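-- pv_equiv track=rewrite | github.com/yzjedu/cs151-lab8-antonio_lucas | main.py | times_rolled
-- ===== SOURCE A (Python) =====
-- def times_rolled(list_of_values):
--     sums_list = []
--     count = 2
--     while count <= 12 :
--         sum_count = list_of_values.count(count)
--         sums_list.append(sum_count)
--         count += 1
--     return sums_list
-- ===== SOURCE B (Python) =====
-- def times_rolled(list_of_values):
--     counts = [0] * 11
--     for v in list_of_values:
--         if 2 <= v <= 12:
--             counts[v - 2] += 1
--     return counts
-- ===== Notes on version B (the rewrite author's own statement) =====
-- stated objective: faster
-- what changed: Replaces eleven full .count() scans (one per value 2..12) with a single tally pass that increments an 11-slot frequency table indexed by value-2, then returns that table.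
import Mathlib
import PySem

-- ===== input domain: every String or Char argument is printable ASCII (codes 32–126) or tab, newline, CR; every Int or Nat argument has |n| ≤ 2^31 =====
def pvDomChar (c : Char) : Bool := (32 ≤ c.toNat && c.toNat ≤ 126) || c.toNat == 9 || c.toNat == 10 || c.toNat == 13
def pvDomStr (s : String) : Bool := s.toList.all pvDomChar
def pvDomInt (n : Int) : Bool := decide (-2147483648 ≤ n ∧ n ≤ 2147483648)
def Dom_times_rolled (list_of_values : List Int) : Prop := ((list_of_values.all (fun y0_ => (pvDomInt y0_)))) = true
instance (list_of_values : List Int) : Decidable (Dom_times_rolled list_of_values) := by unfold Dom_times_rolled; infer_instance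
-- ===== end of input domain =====

-- B replaces A's eleven full `.count` scans (one per value 2..12) by a single tally pass into an 11-slot table.

-- ===== PORT A =====
-- A: sums_list = []; count = 2; while count <= 12: sums_list.append(list_of_values.count(count)); count += 1
-- (the counter loop is the fold over range(2, 13))
def times_rolled (list_of_values : List Int) : List Int :=
  (PySem.List.pyRange 2 13 1).foldl
    (fun sums_list count => sums_list ++ [(PySem.List.count list_of_values count : Int)]) []

-- ===== PORT B =====
-- one step of B's tally loop: counts[v-2] += 1 when 2 <= v <= 12 (the guard makes v-2 a valid Nat index, so toNat is exact)
def tallyStep (counts : List Int) (v : Int) : List Int :=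
  if 2 ≤ v ∧ v ≤ 12 then counts.set (v - 2).toNat (counts.getD (v - 2).toNat 0 + 1) else counts

def times_rolled_alt (list_of_values : List Int) : List Int :=
  list_of_values.foldl tallyStep (List.replicate 11 0)

-- ===== PRECONDITION & SPEC =====
def Spec_times_rolled (list_of_values : List Int) (out : List Int) : Prop := out = times_rolled_alt list_of_values
instance (list_of_values : List Int) (out : List Int) : Decidable (Spec_times_rolled list_of_values out) := by unfold Spec_times_rolled; infer_instance

-- ===== CLAIM (what is proved, stated in full; the proofs are below) =====
def Claim_equal_times_rolled : Prop := ∀ (list_of_values : List Int), Dom_times_rolled list_of_values → Spec_times_rolled list_of_values (times_rolled list_of_values)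

-- ===== LEMMAS AND PROOFS =====

-- B's tally loop never changes the table's length
theorem length_foldl_tallyStep (l : List Int) (acc : List Int) :
    (l.foldl tallyStep acc).length = acc.length := by
  induction l generalizing acc with
  | nil => rfl
  | cons v l ih =>
      simp only [List.foldl_cons, ih]
      unfold tallyStep
      split <;> simp

-- invariant of B's tally loop: slot i accumulates the number of occurrences of i+2
theorem getD_foldl_tallyStep (l : List Int) (acc : List Int) (i : Nat)
    (hi : i < acc.length) (hub : i < 11) :
    (l.foldl tallyStep acc).getD i 0 = acc.getD i 0 + (l.count ((i : Int) + 2) : Int) := by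
  induction l generalizing acc with
  | nil => simp
  | cons v l ih =>
      have hlen : (tallyStep acc v).length = acc.length := by
        unfold tallyStep; split <;> simp
      rw [List.foldl_cons, ih (tallyStep acc v) (hlen ▸ hi)]
      by_cases hv : v = (i : Int) + 2
      · have hg : 2 ≤ v ∧ v ≤ 12 := by omega
        have hidx : (v - 2).toNat = i := by omega
        unfold tallyStep
        rw [if_pos hg, hidx]
        rw [List.getD_eq_getElem?_getD, List.getElem?_set_eq_of_lt _ hi]
        simp [hv, List.getD_eq_getElem?_getD]
        omega
      · have hcount : (v :: l).count ((i : Int) + 2) = l.count ((i : Int) + 2) := by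
          simp [hv]
        rw [hcount]
        unfold tallyStep
        split
        · rename_i hg
          have hne : (v - 2).toNat ≠ i := by omega
          rw [List.getD_eq_getElem?_getD, List.getElem?_set_ne hne, ← List.getD_eq_getElem?_getD]
        · rfl

theorem times_rolled_eq_counts (l : List Int) :
    times_rolled l =
      [((PySem.List.count l 2 : Nat) : Int), (PySem.List.count l 3 : Int), (PySem.List.count l 4 : Int),
       (PySem.List.count l 5 : Int), (PySem.List.count l 6 : Int), (PySem.List.count l 7 : Int),
       (PySem.List.count l 8 : Int), (PySem.List.count l 9 : Int), (PySem.List.count l 10 : Int),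
       (PySem.List.count l 11 : Int), (PySem.List.count l 12 : Int)] := by
  have hr : PySem.List.pyRange 2 13 1 = [2, 3, 4, 5, 6, 7, 8, 9, 10, 11, 12] := by
    rw [PySem.List.pyRange_one]
    norm_num
    simp [List.range_succ]
  simp [times_rolled, hr]

-- ===== VERDICT (by name: the statement is the Claim_ definition above) =====
theorem times_rolled_spec : Claim_equal_times_rolled := by
  intro l _
  show times_rolled l = times_rolled_alt l
  have hA := times_rolled_eq_counts l
  apply List.ext_getElem
  · simp [hA, times_rolled_alt, length_foldl_tallyStep]
  · intro i h1 h2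
    have hi11 : i < 11 := by
      have := h1; rw [hA] at this; simpa using this
    have h2' : i < (l.foldl tallyStep (List.replicate 11 0)).length := by
      simpa [times_rolled_alt] using h2
    have hstep := getD_foldl_tallyStep l (List.replicate 11 0) i (by simpa using hi11) hi11
    rw [List.getD_eq_getElem _ _ h2', List.getD_replicate _ hi11] at hstep
    show (times_rolled l)[i]'h1 = (times_rolled_alt l)[i]'h2
    have hB : (times_rolled_alt l)[i]'h2 = 0 + (l.count ((i : Int) + 2) : Int) := hstep
    rw [hB]
    interval_cases i <;> simp [hA]
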